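-- pv_equiv track=rewrite | github.com/DhimanGhosh/my-player | my_player/io/library_io.py | looks_like_header
-- ===== SOURCE A (Python) =====
-- from typing import Dict, List, Iterable, Tuple
--
-- def looks_like_header(row: List[str]) -> bool:
--     """
--     Heuristic to decide whether the first row is a header.
--
--     We expect something that looks like columns for title / album / artists.
--     """
--     lowered = [c.strip().lower() for c in row]
--     if not lowered:
--         return False
--
--     joined = " ".join(lowered)
--     has_title = any("title" in c or "song" in c for c in lowered)
--     has_album = any(word in joined for word in ("album", "film", "movie"))
--     has_artist = any(word in joined for word in ("artist", "singer", "singers"))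
--
--     # Basic sanity: at least 2–3 columns and reasonable header words
--     return len(lowered) >= 2 and has_title and (has_album or has_artist)
-- ===== SOURCE B (Python) =====
-- def looks_like_header(row):
--     count = 0
--     has_title = has_album = has_artist = False
--     for col in row:
--         c = col.strip().lower()
--         count += 1
--         has_title = has_title or "title" in c or "song" in c
--         has_album = has_album or "album" in c or "film" in c or "movie" in c
--         has_artist = has_artist or "artist" in c or "singer" in c or "singers" in c
--     return count >= 2 and has_title and (has_album or has_artist)
-- ===== Notes on version B (the rewrite author's own statement) =====
-- stated objective: simpler
-- what changed: Single pass over the columns maintaining a count and three boolean flags, dropping the intermediate joined string and the three separate any() scans (safe because no keyword contains a space).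
import Mathlib
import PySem

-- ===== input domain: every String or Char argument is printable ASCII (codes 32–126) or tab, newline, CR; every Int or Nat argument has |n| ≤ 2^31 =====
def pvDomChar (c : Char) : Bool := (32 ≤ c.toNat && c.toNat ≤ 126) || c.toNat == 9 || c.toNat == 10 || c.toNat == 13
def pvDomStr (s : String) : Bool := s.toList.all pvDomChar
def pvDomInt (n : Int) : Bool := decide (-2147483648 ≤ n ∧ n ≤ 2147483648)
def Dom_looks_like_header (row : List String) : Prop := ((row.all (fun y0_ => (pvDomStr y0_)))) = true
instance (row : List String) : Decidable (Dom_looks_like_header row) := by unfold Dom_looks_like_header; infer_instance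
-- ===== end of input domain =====

-- B replaces A's joined string and three any() scans by one pass with a count and three flags (objective: simpler).

-- ===== PORT A =====
def looks_like_header (row : List String) : Bool :=
  let lowered := row.map (fun c => PySem.Str.lower (PySem.Str.strip c))
  if lowered = [] then false
  else
    let joined := PySem.Str.join " " lowered
    let has_title := lowered.any (fun c => PySem.Str.isIn "title" c || PySem.Str.isIn "song" c)
    let has_album := ["album", "film", "movie"].any (fun w => PySem.Str.isIn w joined)
    let has_artist := ["artist", "singer", "singers"].any (fun w => PySem.Str.isIn w joined)
    decide (2 ≤ lowered.length) && has_title && (has_album || has_artist)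

-- ===== PORT B =====
def looks_like_header_alt (row : List String) : Bool :=
  let st := row.foldl (fun (s : Nat × Bool × Bool × Bool) col =>
      let c := PySem.Str.lower (PySem.Str.strip col)
      (s.1 + 1,
       s.2.1 || PySem.Str.isIn "title" c || PySem.Str.isIn "song" c,
       s.2.2.1 || PySem.Str.isIn "album" c || PySem.Str.isIn "film" c || PySem.Str.isIn "movie" c,
       s.2.2.2 || PySem.Str.isIn "artist" c || PySem.Str.isIn "singer" c || PySem.Str.isIn "singers" c))
    (0, false, false, false)
  decide (2 ≤ st.1) && st.2.1 && (st.2.2.1 || st.2.2.2)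

-- ===== PRECONDITION & SPEC =====
def Spec_looks_like_header (row : List String) (out : Bool) : Prop := out = looks_like_header_alt row
instance (row : List String) (out : Bool) : Decidable (Spec_looks_like_header row out) := by unfold Spec_looks_like_header; infer_instance

-- ===== CLAIM (what is proved, stated in full; the proofs are below) =====
def Claim_equal_looks_like_header : Prop := ∀ (row : List String), Dom_looks_like_header row → Spec_looks_like_header row (looks_like_header row)

-- ===== LEMMAS AND PROOFS =====

-- A prefix of u ++ x :: b that does not contain x is a prefix of u.
lemma prefix_of_prefix_append_cons {α : Type} (x : α) (w u b : List α) (hx : x ∉ w)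
    (h : w <+: u ++ x :: b) : w <+: u := by
  have hux : u ++ [x] <+: u ++ x :: b := ⟨b, by simp⟩
  rcases List.prefix_or_prefix_of_prefix h hux with h1 | h1
  · rcases List.prefix_or_prefix_of_prefix h1 (List.prefix_append u [x]) with h2 | h2
    · exact h2
    · by_cases hlen : w.length ≤ u.length
      · exact List.prefix_of_prefix_length_le h1 (List.prefix_append u [x]) hlen
      · have hle : w.length ≤ u.length + 1 := by
          have := h1.length_le; simpa using this
        have : w = u ++ [x] := h1.eq_of_length (by simp; omega)
        exact absurd (this ▸ (by simp : x ∈ u ++ [x])) hx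
  · exact absurd (h1.subset (by simp)) hx

-- An x-free infix of u ++ x :: b lies entirely in u or entirely in b.
lemma infix_append_cons_iff {α : Type} (x : α) (w u b : List α) (hx : x ∉ w) :
    w <:+: u ++ x :: b ↔ w <:+: u ∨ w <:+: b := by
  constructor
  · induction u with
    | nil =>
      intro h
      rcases List.infix_cons_iff.mp (by simpa using h) with hp | hb
      · have : w <+: ([] : List α) := prefix_of_prefix_append_cons x w [] b hx (by simpa using hp)
        exact Or.inl this.isInfix
      · exact Or.inr hb
    | cons y u' ih =>
      intro h
      rcases List.infix_cons_iff.mp (by simpa using h) with hp | hrest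
      · have : w <+: y :: u' := by
          have := prefix_of_prefix_append_cons x w (y :: u') b hx (by simpa using hp)
          exact this
        exact Or.inl this.isInfix
      · rcases ih hrest with h1 | h1
        · exact Or.inl (h1.trans ⟨[y], [], by simp⟩)
        · exact Or.inr h1
  · rintro (h | h)
    · exact h.trans ⟨[], x :: b, by simp⟩
    · exact h.trans ⟨u ++ [x], [], by simp⟩

-- 'w in x.join(parts)' for a single-char separator not occurring in w is a per-part membership.
lemma chars_isIn_join (x : Char) (w : List Char) (hw : w ≠ []) (hx : x ∉ w)
    (ws : List (List Char)) :
    PySem.Chars.isIn w (PySem.Chars.join [x] ws) = ws.any (fun c => PySem.Chars.isIn w c) := by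
  induction ws with
  | nil =>
    rw [PySem.Chars.join_nil]
    simp only [List.any_nil]
    rw [PySem.Chars.isIn_eq_false_iff]
    intro h
    exact hw (List.eq_nil_of_infix_nil h)
  | cons c rest ih =>
    cases rest with
    | nil => simp [PySem.Chars.join_singleton]
    | cons d rest' =>
      rw [PySem.Chars.join_cons_cons]
      have hx2 : c ++ [x] ++ PySem.Chars.join [x] (d :: rest') = c ++ x :: PySem.Chars.join [x] (d :: rest') := by simp
      have ihP : w <:+: PySem.Chars.join [x] (d :: rest') ↔
          ((d :: rest').any fun c => PySem.Chars.isIn w c) = true := by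
        rw [← PySem.Chars.isIn_iff_infix, ih]
      rw [hx2, Bool.eq_iff_iff]
      simp only [List.any_cons, Bool.or_eq_true, PySem.Chars.isIn_iff_infix]
      rw [infix_append_cons_iff x w c _ hx, ihP]
      simp [PySem.Chars.isIn_iff_infix]

lemma str_isIn_join (w : String) (hw : w.toList ≠ []) (hx : ' ' ∉ w.toList) (parts : List String) :
    PySem.Str.isIn w (PySem.Str.join " " parts) = parts.any (fun s => PySem.Str.isIn w s) := by
  rw [PySem.Str.isIn_eq, PySem.Str.toList_join]
  have : (" ".toList : List Char) = [' '] := rfl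
  rw [this, chars_isIn_join ' ' w.toList hw hx]
  simp [List.any_map, PySem.Str.isIn_eq, Function.comp_def]

-- B's fold computes the column count and the three flags.
lemma foldl_flags (row : List String) (n : Nat) (t al ar : Bool) :
    row.foldl (fun (s : Nat × Bool × Bool × Bool) col =>
      let c := PySem.Str.lower (PySem.Str.strip col)
      (s.1 + 1,
       s.2.1 || PySem.Str.isIn "title" c || PySem.Str.isIn "song" c,
       s.2.2.1 || PySem.Str.isIn "album" c || PySem.Str.isIn "film" c || PySem.Str.isIn "movie" c,
       s.2.2.2 || PySem.Str.isIn "artist" c || PySem.Str.isIn "singer" c || PySem.Str.isIn "singers" c))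
      (n, t, al, ar)
    = (n + row.length,
       t || row.any (fun col =>
         let c := PySem.Str.lower (PySem.Str.strip col)
         PySem.Str.isIn "title" c || PySem.Str.isIn "song" c),
       al || row.any (fun col =>
         let c := PySem.Str.lower (PySem.Str.strip col)
         PySem.Str.isIn "album" c || PySem.Str.isIn "film" c || PySem.Str.isIn "movie" c),
       ar || row.any (fun col =>
         let c := PySem.Str.lower (PySem.Str.strip col)
         PySem.Str.isIn "artist" c || PySem.Str.isIn "singer" c || PySem.Str.isIn "singers" c)) := by
  induction row generalizing n t al ar with
  | nil => simp
  | cons s rest ih =>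
    simp only [List.foldl_cons, List.any_cons, List.length_cons, ih]
    refine Prod.ext (by omega) (Prod.ext ?_ (Prod.ext ?_ ?_)) <;> simp [Bool.or_assoc]

lemma any_or3 {α : Type} (l : List α) (p q r : α → Bool) :
    (l.any p || (l.any q || l.any r)) = l.any (fun a => p a || q a || r a) := by
  induction l with
  | nil => simp
  | cons a l ih =>
    simp only [List.any_cons, ← ih]
    cases p a <;> cases q a <;> cases r a <;> simp

-- ===== VERDICT (by name: the statement is the Claim_ definition above) =====
theorem looks_like_header_spec : Claim_equal_looks_like_header := by
  intro row _
  unfold Spec_looks_like_header looks_like_header looks_like_header_alt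
  rw [foldl_flags]
  by_cases hrow : row = []
  · subst hrow; rfl
  · rw [if_neg (by simpa using hrow)]
    dsimp only
    simp only [List.any_cons, List.any_nil, Bool.or_false]
    rw [str_isIn_join "album" (by decide) (by decide),
        str_isIn_join "film" (by decide) (by decide),
        str_isIn_join "movie" (by decide) (by decide),
        str_isIn_join "artist" (by decide) (by decide),
        str_isIn_join "singer" (by decide) (by decide),
        str_isIn_join "singers" (by decide) (by decide)]
    simp only [List.any_map, List.length_map, Function.comp_def, Bool.false_or, Nat.zero_add]
    rw [any_or3, any_or3]
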